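-- pv_equiv track=rewrite | github.com/wamud/2025-TI | quokka_simulator/RUN_RABI.py | find_detection_events
-- ===== SOURCE A (Python) =====
-- def binary_add_modulo_2(str1, str2):
--     if len(str1) != len(str2):
--         raise ValueError("Input strings must have the same length")
--
--     binary_sum = ''
--     for i in range(len(str1)):
--         binary_sum += str((int(str1[i]) + int(str2[i])) % 2)
--     return binary_sum
--
-- def find_detection_events(stabiliser_measurements):
--     all_detection_events = []
--     at_least_one_detection_event = []
--     for rep in stabiliser_measurements:
--         rep_detection_events = []
--         error_detected = False
--         for i in range(len(rep[:-1])):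
--             sweep1 = rep[i]
--             sweep2 = rep[i+1]
--             detection_events = binary_add_modulo_2(sweep1,sweep2)
--             if '1' in detection_events: error_detected = True
--             rep_detection_events.append(detection_events)
--         all_detection_events.append(rep_detection_events)
--         at_least_one_detection_event.append(error_detected)
--     return all_detection_events, at_least_one_detection_event
-- ===== SOURCE B (Python) =====
-- def _bit_value(s):
--     v = 0
--     for c in s:
--         v = v * 2 + (ord(c) - 48 & 1)
--     return v
--
-- def find_detection_events(stabiliser_measurements):
--     all_detection_events = []
--     at_least_one_detection_event = []
--     for rep in stabiliser_measurements:
--         if any(len(a) != len(b) for a, b in zip(rep, rep[1:])):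
--             raise ValueError("Input strings must have the same length")
--         vals = [_bit_value(s) for s in rep]
--         dets = [format(v1 ^ v2, '0{}b'.format(L)) if L else ''
--                 for v1, v2, L in zip(vals, vals[1:], map(len, rep))]
--         all_detection_events.append(dets)
--         at_least_one_detection_event.append(any(v1 != v2 for v1, v2 in zip(vals, vals[1:])))
--     return all_detection_events, at_least_one_detection_event
-- ===== Notes on version B (the rewrite author's own statement) =====
-- stated objective: alternative
-- what changed: B encodes each sweep once as an integer (bit = digit parity), XORs adjacent integers and renders the result back as a fixed-width binary string, deriving the flag from integer inequality, instead of A's index loop that builds each detection string character by character with per-character int()/mod-2 arithmetic.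
import Mathlib
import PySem

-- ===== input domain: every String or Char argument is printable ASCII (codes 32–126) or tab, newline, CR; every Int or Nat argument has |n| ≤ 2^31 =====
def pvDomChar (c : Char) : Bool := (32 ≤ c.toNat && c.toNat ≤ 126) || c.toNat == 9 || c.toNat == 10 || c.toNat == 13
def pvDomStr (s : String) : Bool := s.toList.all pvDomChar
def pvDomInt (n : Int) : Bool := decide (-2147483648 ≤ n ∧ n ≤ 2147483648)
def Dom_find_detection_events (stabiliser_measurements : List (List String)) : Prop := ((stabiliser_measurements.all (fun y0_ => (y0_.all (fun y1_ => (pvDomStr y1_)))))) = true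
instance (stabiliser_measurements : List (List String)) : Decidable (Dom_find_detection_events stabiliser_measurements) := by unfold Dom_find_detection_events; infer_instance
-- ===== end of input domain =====

-- B re-implements the per-rep pass with integers: each sweep is encoded once as an integer,
-- adjacent sweeps are combined with bitwise XOR and rendered back to a fixed-width binary
-- string, and the flag is adjacent-value inequality; A instead builds each detection string
-- character by character with an index loop and decimal arithmetic mod 2.

-- ===== PORT A =====
-- port of binary_add_modulo_2; `none` = the explicit ValueError on length mismatch.
-- int(str1[i]) is PySem.Int.ofChars? on the one-character string (none = ValueError, excluded
-- by Pre_); str((..)%2) is PySem.Int.toChars; string `+=` is list append on the char list.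
def binary_add_modulo_2 (str1 str2 : String) : Option String :=
  if str1.toList.length ≠ str2.toList.length then none
  else some (String.ofList ((List.range str1.toList.length).foldl
    (fun acc i =>
      acc ++ PySem.Int.toChars (PySem.Int.mod
        ((PySem.Int.ofChars? [str1.toList.getD i ' ']).getD 0
          + (PySem.Int.ofChars? [str2.toList.getD i ' ']).getD 0) 2))
    []))

-- len(rep[:-1]) = rep.length - 1 (Nat subtraction gives 0 for the empty rep, as the slice does);
-- rep[i] / rep[i+1] are in range for i in that range, so getD is exact; a `none` from
-- binary_add_modulo_2 (= raise) is collapsed with getD "" — those inputs are outside Pre_.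
def find_detection_events (stabiliser_measurements : List (List String)) : List (List String) × List Bool :=
  stabiliser_measurements.foldl
    (fun acc rep =>
      let inner := (List.range (rep.length - 1)).foldl
        (fun (s : List String × Bool) i =>
          let sweep1 := rep.getD i ""
          let sweep2 := rep.getD (i+1) ""
          let de := (binary_add_modulo_2 sweep1 sweep2).getD ""
          (s.1 ++ [de], if PySem.Str.isIn "1" de then true else s.2))
        ([], false)
      (acc.1 ++ [inner.1], acc.2 ++ [inner.2]))
    ([], [])

-- ===== PORT B =====
-- v = v * 2 + (ord(c) - 48 & 1)  over the characters of s
def pvBitValue (s : String) : Int :=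
  s.toList.foldl (fun v c => v * 2 + PySem.Int.band ((c.toNat : Int) - 48) 1) 0

-- minimal binary digits of a positive number (MSB first); format's digit core.
-- structural recursion on a fuel bound (fuel ≥ m suffices; pvNatBits passes m itself)
def pvNatBitsAux : Nat → Nat → List Char
  | 0, _ => []
  | (f+1), m =>
    if m = 0 then []
    else pvNatBitsAux f (m/2) ++ [if m % 2 = 1 then '1' else '0']

def pvNatBits (m : Nat) : List Char := pvNatBitsAux m m

-- format(x, '0{L}b') for 0 ≤ x (the only values B feeds it under Pre_): minimal binary
-- representation, left-padded with '0' to width L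
def pvFormatBin (x : Nat) (L : Nat) : List Char :=
  List.replicate (L - (if x = 0 then ['0'] else pvNatBits x).length) '0'
    ++ (if x = 0 then ['0'] else pvNatBits x)

-- one rep of B's loop body; the `any` length check is the raise ValueError (excluded by Pre_,
-- the port then returns a dummy)
def pvRepAlt (rep : List String) : List String × Bool :=
  if (rep.zip (rep.drop 1)).any (fun p => p.1.toList.length ≠ p.2.toList.length) then
    ([], false)
  else
    let vals := rep.map pvBitValue
    let dets := ((vals.zip (vals.drop 1)).zip (rep.map (fun s => s.toList.length))).map
      (fun q => if q.2 ≠ 0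
        then String.ofList (pvFormatBin (PySem.Int.bxor q.1.1 q.1.2).toNat q.2)
        else "")
    (dets, (vals.zip (vals.drop 1)).any (fun p => p.1 ≠ p.2))

def find_detection_events_alt (stabiliser_measurements : List (List String)) : List (List String) × List Bool :=
  stabiliser_measurements.foldl
    (fun acc rep =>
      let r := pvRepAlt rep
      (acc.1 ++ [r.1], acc.2 ++ [r.2]))
    ([], [])

-- ===== PRECONDITION & SPEC =====
-- Pre_ excludes exactly the inputs on which A raises: a rep whose adjacent sweeps differ in
-- length (ValueError in binary_add_modulo_2) or, when the rep has at least two sweeps, a sweep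
-- character that is not a decimal digit (ValueError in int()).
def Pre_find_detection_events (stabiliser_measurements : List (List String)) : Prop :=
  ∀ rep ∈ stabiliser_measurements,
    (∀ p ∈ rep.zip (rep.drop 1), p.1.toList.length = p.2.toList.length) ∧
    (2 ≤ rep.length → ∀ s ∈ rep,
      (s.toList.all (fun c => c ∈ ['0','1','2','3','4','5','6','7','8','9'])) = true)
instance (stabiliser_measurements : List (List String)) : Decidable (Pre_find_detection_events stabiliser_measurements) := by unfold Pre_find_detection_events; infer_instance

def pvWitness_find_detection_events : List (List String) := [["10", "11"], []]

def Spec_find_detection_events (stabiliser_measurements : List (List String)) (out : List (List String) × List Bool) : Prop := out = find_detection_events_alt stabiliser_measurements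
instance (stabiliser_measurements : List (List String)) (out : List (List String) × List Bool) : Decidable (Spec_find_detection_events stabiliser_measurements out) := by unfold Spec_find_detection_events; infer_instance

-- ===== CLAIM (what is proved, stated in full; the proofs are below) =====
def Claim_equal_find_detection_events : Prop := ∀ (stabiliser_measurements : List (List String)), Dom_find_detection_events stabiliser_measurements → Pre_find_detection_events stabiliser_measurements → Spec_find_detection_events stabiliser_measurements (find_detection_events stabiliser_measurements)

-- ===== LEMMAS AND PROOFS =====

-- proof-side abbreviations: digit chars, a character's bit, the bit encoding of a char list,
-- and the per-position xor character
def pvDig : List Char := ['0','1','2','3','4','5','6','7','8','9']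
def pvBitc (c : Char) : Nat := (c.toNat - 48) % 2
def pvNatVal (l : List Char) : Nat := l.foldl (fun v c => 2*v + pvBitc c) 0
def pvXc (c1 c2 : Char) : Char := if pvBitc c1 ^^^ pvBitc c2 = 1 then '1' else '0'

theorem pv_xor_split (a b x y : Nat) (hx : x < 2) (hy : y < 2) :
    (2*a+x) ^^^ (2*b+y) = 2*(a^^^b) + (x^^^y) := by
  have key : ∀ (p q : Bool), (Nat.bit p a) ^^^ (Nat.bit q b) = 2*(a^^^b) + (p.toNat ^^^ q.toNat) := by
    intro p q
    rw [Nat.xor_bit]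
    cases p <;> cases q <;> simp [Nat.bit_val, Nat.mul_comm]
  interval_cases x <;> interval_cases y
  · simpa [Nat.bit_val] using key false false
  · simpa [Nat.bit_val] using key false true
  · simpa [Nat.bit_val] using key true false
  · simpa [Nat.bit_val] using key true true

theorem pv_singleton_infix (a : Char) (l : List Char) : [a] <:+: l ↔ a ∈ l := by
  constructor
  · intro h; exact h.mem (List.mem_singleton_self a)
  · intro h
    obtain ⟨p, q, rfl⟩ := List.mem_iff_append.mp h
    exact ⟨p, q, by simp⟩

-- digit-character facts (10 / 100 cases, decided)
theorem pv_ofChars_digit (c : Char) (h : c ∈ pvDig) :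
    PySem.Int.ofChars? [c] = some ((c.toNat : Int) - 48) := by
  fin_cases h <;> decide

theorem pv_band_digit (c : Char) (h : c ∈ pvDig) :
    PySem.Int.band ((c.toNat : Int) - 48) 1 = (pvBitc c : Int) := by
  fin_cases h <;> decide

theorem pv_char_step (c1 c2 : Char) (h1 : c1 ∈ pvDig) (h2 : c2 ∈ pvDig) :
    PySem.Int.toChars (PySem.Int.mod (((c1.toNat : Int) - 48) + ((c2.toNat : Int) - 48)) 2)
      = [pvXc c1 c2] := by
  fin_cases h1 <;> fin_cases h2 <;> decide

theorem pv_bitc_lt (c : Char) : pvBitc c < 2 := Nat.mod_lt _ (by omega)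

theorem pv_xor_bitc_lt (a b : Char) : pvBitc a ^^^ pvBitc b < 2 := by
  have ha := pv_bitc_lt a; have hb := pv_bitc_lt b
  interval_cases h1 : (pvBitc a) <;> interval_cases h2 : (pvBitc b) <;> decide

theorem pv_bitValue_cast_aux (l : List Char) (h : ∀ c ∈ l, c ∈ pvDig) (v : Nat) :
    l.foldl (fun v c => v * 2 + PySem.Int.band ((c.toNat : Int) - 48) 1) (v : Int)
      = ((l.foldl (fun v c => 2*v + pvBitc c) v : Nat) : Int) := by
  induction l generalizing v with
  | nil => simp
  | cons c t ih =>
    simp only [List.foldl_cons]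
    rw [pv_band_digit c (h c (by simp))]
    have h2 : (v : Int) * 2 + (pvBitc c : Int) = ((2*v + pvBitc c : Nat) : Int) := by
      push_cast; ring
    rw [h2, ih (fun c hc => h c (by simp [hc]))]

theorem pv_bitValue_cast (s : String) (h : ∀ c ∈ s.toList, c ∈ pvDig) :
    pvBitValue s = (pvNatVal s.toList : Int) := by
  simpa using pv_bitValue_cast_aux s.toList h 0

theorem pv_natVal_append (l : List Char) (c : Char) :
    pvNatVal (l ++ [c]) = 2 * pvNatVal l + pvBitc c := by
  have : ∀ v : Nat, (l ++ [c]).foldl (fun v c => 2*v + pvBitc c) v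
      = 2 * (l.foldl (fun v c => 2*v + pvBitc c) v) + pvBitc c := by
    intro v; rw [List.foldl_append]; simp
  exact this 0

theorem pv_natBitsAux_fuel (m : Nat) : ∀ f f', m ≤ f → m ≤ f' →
    pvNatBitsAux f m = pvNatBitsAux f' m := by
  induction m using Nat.strong_induction_on with
  | _ m ih =>
    intro f f' hf hf'
    rcases Nat.eq_zero_or_pos m with rfl | hm
    · cases f <;> cases f' <;> simp [pvNatBitsAux]
    · obtain ⟨g, rfl⟩ : ∃ g, f = g + 1 := ⟨f - 1, by omega⟩
      obtain ⟨g', rfl⟩ : ∃ g', f' = g' + 1 := ⟨f' - 1, by omega⟩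
      simp only [pvNatBitsAux, if_neg (by omega : m ≠ 0)]
      rw [ih (m/2) (by omega) g g' (by omega) (by omega)]

theorem pv_natBits_pos (m : Nat) (hm : 1 ≤ m) :
    pvNatBits m = pvNatBits (m / 2) ++ [if m % 2 = 1 then '1' else '0'] := by
  obtain ⟨k, rfl⟩ : ∃ k, m = k + 1 := ⟨m - 1, by omega⟩
  show pvNatBitsAux (k+1) (k+1) = _
  simp only [pvNatBitsAux, if_neg (by omega : k + 1 ≠ 0)]
  rw [pv_natBitsAux_fuel ((k+1)/2) k ((k+1)/2) (by omega) (by omega)]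
  rfl

theorem pv_formatBin_zero (L : Nat) (hL : 1 ≤ L) :
    pvFormatBin 0 L = List.replicate L '0' := by
  unfold pvFormatBin
  simp only [if_pos rfl, List.length_singleton]
  rw [show L = (L - 1) + 1 by omega, List.replicate_succ']
  simp

theorem pv_formatBin_step (x z L : Nat) (hz : z < 2) (hL : 1 ≤ L) :
    pvFormatBin (2*x + z) (L+1) = pvFormatBin x L ++ [if z = 1 then '1' else '0'] := by
  rcases Nat.eq_zero_or_pos x with hx | hx
  · subst hx
    interval_cases z
    · simp only [Nat.mul_zero, Nat.add_zero]
      rw [pv_formatBin_zero _ (by omega), pv_formatBin_zero _ hL]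
      simp [List.replicate_succ']
    · rw [pv_formatBin_zero _ hL]
      unfold pvFormatBin
      norm_num
      simp [show pvNatBits 1 = ['1'] from rfl]
  · have hne : 2*x + z ≠ 0 := by omega
    unfold pvFormatBin
    rw [if_neg hne, if_neg (by omega : x ≠ 0)]
    rw [pv_natBits_pos _ (by omega)]
    have hdiv : (2*x + z) / 2 = x := by omega
    have hmod : (2*x + z) % 2 = z := by omega
    rw [hdiv, hmod]
    rw [List.length_append, List.length_singleton]
    have hpad : L + 1 - ((pvNatBits x).length + 1) = L - (pvNatBits x).length := by omega
    rw [hpad, List.append_assoc]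

theorem pv_one_mem_natBits (m : Nat) (hm : 1 ≤ m) : '1' ∈ pvNatBits m := by
  induction m using Nat.strong_induction_on with
  | _ m ih =>
    rw [pv_natBits_pos m hm]
    rcases Nat.lt_or_ge m 2 with h2 | h2
    · have hm1 : m = 1 := by omega
      subst hm1
      simp [show pvNatBits 0 = [] from rfl]
    · exact List.mem_append_left _ (ih (m / 2) (by omega) (by omega))

theorem pv_one_mem_formatBin (x L : Nat) : '1' ∈ pvFormatBin x L ↔ x ≠ 0 := by
  constructor
  · intro h hx
    subst hx
    unfold pvFormatBin at h
    simp only [if_pos rfl] at h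
    rcases List.mem_append.mp h with h | h
    · exact absurd (List.eq_of_mem_replicate h) (by decide)
    · simp at h
  · intro hx
    unfold pvFormatBin
    rw [if_neg hx]
    exact List.mem_append_right _ (pv_one_mem_natBits x (by omega))

-- the core: the fixed-width rendering of the xor of the two encodings is the
-- position-wise xor string
theorem pv_render_eq_zipWith (l1 : List Char) :
    ∀ l2 : List Char, l1.length = l2.length →
      (∀ c ∈ l1, c ∈ pvDig) → (∀ c ∈ l2, c ∈ pvDig) → l1 ≠ [] →
      pvFormatBin (pvNatVal l1 ^^^ pvNatVal l2) l1.length = List.zipWith pvXc l1 l2 := by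
  induction l1 using List.reverseRecOn with
  | nil => intro l2 _ _ _ hne; exact absurd rfl hne
  | append_singleton l1' a ih =>
    intro l2 hlen h1 h2 _
    have h2ne : l2 ≠ [] := by
      intro h; subst h; simp at hlen
    obtain ⟨l2', b, rfl⟩ : ∃ l2' b, l2 = l2' ++ [b] := by
      rcases List.eq_nil_or_concat l2 with h | h
      · exact absurd h h2ne
      · obtain ⟨l', b, hb⟩ := h
        exact ⟨l', b, by simpa [List.concat_eq_append] using hb⟩
    have hlen' : l1'.length = l2'.length := by
      simp only [List.length_append, List.length_singleton] at hlen; omega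
    rw [pv_natVal_append, pv_natVal_append,
        pv_xor_split _ _ _ _ (pv_bitc_lt a) (pv_bitc_lt b),
        List.zipWith_append hlen']
    have hxc : List.zipWith pvXc [a] [b] = [pvXc a b] := by simp
    rw [hxc]
    rcases List.eq_nil_or_concat l1' with h1nil | hcons
    · subst h1nil
      have h2nil : l2' = [] := by
        cases l2' with
        | nil => rfl
        | cons _ _ => simp at hlen'
      subst h2nil
      simp only [pvNatVal, List.foldl_nil, List.length_append, List.length_nil,
        List.length_singleton, List.nil_append, List.zipWith_nil_left,
        Nat.mul_zero, Nat.zero_add, Nat.xor_self, Nat.zero_xor]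
      have hlt := pv_xor_bitc_lt a b
      rcases (show pvBitc a ^^^ pvBitc b = 0 ∨ pvBitc a ^^^ pvBitc b = 1 by omega) with h | h <;> rw [h]
      · rw [pv_formatBin_zero 1 (by omega)]
        simp [pvXc, h]
      · unfold pvFormatBin
        rw [if_neg (by omega)]
        simp [pvXc, h, show pvNatBits 1 = ['1'] from rfl]
    · have h1'ne : l1' ≠ [] := by
        obtain ⟨L, c, rfl⟩ := hcons; simp
      have hL1 : 1 ≤ l1'.length := List.length_pos_of_ne_nil h1'ne
      rw [List.length_append, List.length_singleton,
          pv_formatBin_step _ _ _ (pv_xor_bitc_lt a b) hL1]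
      have hstepch : (if pvBitc a ^^^ pvBitc b = 1 then '1' else '0') = pvXc a b := rfl
      rw [hstepch]
      congr 1
      exact ih l2' hlen' (fun c hc => h1 c (by simp [hc])) (fun c hc => h2 c (by simp [hc])) h1'ne

-- per-index map over range equals zipWith
theorem pv_map_range_getD (g : Char → Char → Char) (l1 l2 : List Char)
    (hlen : l1.length = l2.length) :
    (List.range l1.length).map (fun i => g (l1.getD i ' ') (l2.getD i ' '))
      = List.zipWith g l1 l2 := by
  apply List.ext_getElem
  · simp [hlen]
  · intro i hi1 hi2
    simp only [List.length_map, List.length_range] at hi1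
    simp only [List.getElem_map, List.getElem_range, List.getElem_zipWith]
    rw [List.getD_eq_getElem _ _ hi1, List.getD_eq_getElem _ _ (by omega)]

-- A's inner per-pair computation, for digit sweeps of equal length
theorem pv_binary_add_eq (s1 s2 : String)
    (hlen : s1.toList.length = s2.toList.length)
    (h1 : ∀ c ∈ s1.toList, c ∈ pvDig) (h2 : ∀ c ∈ s2.toList, c ∈ pvDig) :
    (binary_add_modulo_2 s1 s2).getD ""
      = String.ofList (List.zipWith pvXc s1.toList s2.toList) := by
  unfold binary_add_modulo_2
  rw [if_neg (by omega)]
  simp only [Option.getD_some]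
  congr 1
  rw [PySem.List.foldl_append_eq_flatMap
    (fun i => PySem.Int.toChars (PySem.Int.mod
      ((PySem.Int.ofChars? [s1.toList.getD i ' ']).getD 0
        + (PySem.Int.ofChars? [s2.toList.getD i ' ']).getD 0) 2))]
  rw [List.nil_append]
  have hbd : ∀ i ∈ List.range s1.toList.length,
      PySem.Int.toChars (PySem.Int.mod
        ((PySem.Int.ofChars? [s1.toList.getD i ' ']).getD 0
          + (PySem.Int.ofChars? [s2.toList.getD i ' ']).getD 0) 2)
      = [pvXc (s1.toList.getD i ' ') (s2.toList.getD i ' ')] := by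
    intro i hi
    rw [List.mem_range] at hi
    have hm1 : s1.toList.getD i ' ' ∈ pvDig := by
      rw [List.getD_eq_getElem _ _ hi]; exact h1 _ (List.getElem_mem _)
    have hm2 : s2.toList.getD i ' ' ∈ pvDig := by
      rw [List.getD_eq_getElem _ _ (by omega)]; exact h2 _ (List.getElem_mem _)
    rw [pv_ofChars_digit _ hm1, pv_ofChars_digit _ hm2]
    simp only [Option.getD_some]
    exact pv_char_step _ _ hm1 hm2
  calc (List.range s1.toList.length).flatMap
        (fun i => PySem.Int.toChars (PySem.Int.mod
          ((PySem.Int.ofChars? [s1.toList.getD i ' ']).getD 0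
            + (PySem.Int.ofChars? [s2.toList.getD i ' ']).getD 0) 2))
      = (List.range s1.toList.length).flatMap
        (fun i => [pvXc (s1.toList.getD i ' ') (s2.toList.getD i ' ')]) := by
        apply List.flatMap_congr
        exact hbd
    _ = (List.range s1.toList.length).map
        (fun i => pvXc (s1.toList.getD i ' ') (s2.toList.getD i ' ')) :=
        List.map_eq_flatMap.symm
    _ = List.zipWith pvXc s1.toList s2.toList := pv_map_range_getD _ _ _ hlen

-- A's inner loop characterised
theorem pv_inner_char (n : Nat) (f : Nat → String) (g : Nat → Bool)
    (init1 : List String) (init2 : Bool) :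
    (List.range n).foldl
        (fun (s : List String × Bool) i => (s.1 ++ [f i], if g i then true else s.2))
        (init1, init2)
      = (init1 ++ (List.range n).map f, init2 || (List.range n).any g) := by
  induction n generalizing init1 init2 with
  | zero => simp
  | succ n ih =>
    rw [List.range_succ, List.foldl_append, ih, List.foldl_cons, List.foldl_nil]
    simp only [List.map_append, List.any_append, List.map_cons, List.map_nil,
      List.any_cons, List.any_nil]
    refine Prod.ext ?_ ?_
    · simp [List.append_assoc]
    · cases g n <;> simp

-- B's per-pair entry equals A's, and the two flags agree, position by position
theorem pv_pair_det (s1 s2 : String)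
    (hl : s1.toList.length = s2.toList.length)
    (h1 : ∀ c ∈ s1.toList, c ∈ pvDig) (h2 : ∀ c ∈ s2.toList, c ∈ pvDig) :
    (binary_add_modulo_2 s1 s2).getD ""
      = (if s1.toList.length ≠ 0
          then String.ofList (pvFormatBin
            (PySem.Int.bxor (pvBitValue s1) (pvBitValue s2)).toNat s1.toList.length)
          else "") := by
  rw [pv_binary_add_eq s1 s2 hl h1 h2]
  by_cases hz : s1.toList.length = 0
  · rw [if_neg (by omega)]
    have hnil : s1.toList = [] := List.length_eq_zero_iff.mp hz
    rw [hnil]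
    simp
  · rw [if_pos hz]
    rw [pv_bitValue_cast s1 h1, pv_bitValue_cast s2 h2]
    rw [PySem.Int.bxor_natCast]
    rw [Int.toNat_natCast]
    rw [pv_render_eq_zipWith s1.toList s2.toList hl h1 h2
      (by intro h; rw [h] at hz; simp at hz)]

theorem pv_pair_flag (s1 s2 : String)
    (hl : s1.toList.length = s2.toList.length)
    (h1 : ∀ c ∈ s1.toList, c ∈ pvDig) (h2 : ∀ c ∈ s2.toList, c ∈ pvDig) :
    PySem.Str.isIn "1" ((binary_add_modulo_2 s1 s2).getD "")
      = decide (pvBitValue s1 ≠ pvBitValue s2) := by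
  rw [pv_pair_det s1 s2 hl h1 h2, pv_bitValue_cast s1 h1, pv_bitValue_cast s2 h2]
  by_cases hz : s1.toList.length = 0
  · rw [if_neg (by omega)]
    have hv1 : pvNatVal s1.toList = 0 := by
      rw [List.length_eq_zero_iff.mp hz]; rfl
    have hz2 : s2.toList.length = 0 := by omega
    have hv2 : pvNatVal s2.toList = 0 := by
      rw [List.length_eq_zero_iff.mp hz2]; rfl
    rw [hv1, hv2]
    simp only [ne_eq, not_true_eq_false, decide_false]
    decide
  · rw [if_pos hz, PySem.Int.bxor_natCast, Int.toNat_natCast]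
    have hiff : PySem.Str.isIn "1"
        (String.ofList (pvFormatBin (pvNatVal s1.toList ^^^ pvNatVal s2.toList) s1.toList.length)) = true
        ↔ pvNatVal s1.toList ≠ pvNatVal s2.toList := by
      rw [PySem.Str.isIn_iff_infix]
      have htl : (String.ofList (pvFormatBin (pvNatVal s1.toList ^^^ pvNatVal s2.toList) s1.toList.length)).toList
          = pvFormatBin (pvNatVal s1.toList ^^^ pvNatVal s2.toList) s1.toList.length := by
        simp
      rw [htl]
      have hone : ("1" : String).toList = ['1'] := rfl
      rw [hone, pv_singleton_infix, pv_one_mem_formatBin]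
      constructor
      · intro h hne; exact h (by rw [hne, Nat.xor_self])
      · intro h hx; exact h (Nat.xor_eq_zero.mp hx)
    rw [Bool.eq_iff_iff]
    simp only [decide_eq_true_eq]
    rw [hiff]
    exact not_congr (by exact_mod_cast Iff.rfl)

-- A's whole per-rep loop equals B's per-rep computation
theorem pv_rep_eq (rep : List String)
    (hlen : ∀ p ∈ rep.zip (rep.drop 1), p.1.toList.length = p.2.toList.length)
    (hdig : 2 ≤ rep.length → ∀ s ∈ rep, ∀ c ∈ s.toList, c ∈ pvDig) :
    (List.range (rep.length - 1)).foldl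
      (fun (s : List String × Bool) i =>
        (s.1 ++ [(binary_add_modulo_2 (rep.getD i "") (rep.getD (i+1) "")).getD ""],
         if PySem.Str.isIn "1" ((binary_add_modulo_2 (rep.getD i "") (rep.getD (i+1) "")).getD "")
         then true else s.2))
      ([], false)
    = pvRepAlt rep := by
  rw [pv_inner_char (rep.length - 1)
      (fun i => (binary_add_modulo_2 (rep.getD i "") (rep.getD (i+1) "")).getD "")
      (fun i => PySem.Str.isIn "1" ((binary_add_modulo_2 (rep.getD i "") (rep.getD (i+1) "")).getD ""))
      [] false]
  have hmem : ∀ (i : Nat) (hi : i < rep.length - 1),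
      (rep[i]'(by omega)).toList.length = (rep[i+1]'(by omega)).toList.length := by
    intro i hi
    have hz : (rep.zip (rep.drop 1))[i]'(by simp; omega) = (rep[i]'(by omega), rep[i+1]'(by omega)) := by
      rw [List.getElem_zip]
      refine Prod.ext rfl ?_
      rw [List.getElem_drop]
      simp only [Nat.add_comm 1 i]
    have := hlen _ (hz ▸ List.getElem_mem (by simp; omega))
    simpa [hz] using this
  have hdig' : ∀ (i : Nat) (hi : i < rep.length) (h2 : 2 ≤ rep.length),
      ∀ c ∈ (rep[i]'(by omega)).toList, c ∈ pvDig := by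
    intro i hi h2 c hc
    exact hdig h2 _ (List.getElem_mem hi) c hc
  unfold pvRepAlt
  have hguard : ((rep.zip (rep.drop 1)).any
      (fun p => decide ¬(p.1.toList.length = p.2.toList.length))) = false := by
    rw [List.any_eq_false]
    intro p hp
    simpa using hlen p hp
  simp only [ne_eq, hguard, Bool.false_eq_true, if_false, List.nil_append, Bool.false_or]
  refine Prod.ext ?_ ?_
  · show (List.range (rep.length - 1)).map
        (fun i => (binary_add_modulo_2 (rep.getD i "") (rep.getD (i+1) "")).getD "") = _
    apply List.ext_getElem
    · simp only [List.length_map, List.length_range, List.length_zip, List.length_drop]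
      omega
    · intro i hi1 hi2
      simp only [List.length_map, List.length_range] at hi1
      have h2 : 2 ≤ rep.length := by omega
      simp only [List.getElem_map, List.getElem_range, List.getElem_zip, List.getElem_drop,
        Nat.add_comm 1 i]
      rw [List.getD_eq_getElem _ _ (by omega), List.getD_eq_getElem _ _ (by omega)]
      rw [pv_pair_det _ _ (hmem i hi1) (hdig' i (by omega) h2) (hdig' (i+1) (by omega) h2)]
  · show (List.range (rep.length - 1)).any
        (fun i => PySem.Str.isIn "1" ((binary_add_modulo_2 (rep.getD i "") (rep.getD (i+1) "")).getD "")) = _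
    have hmap2 : (List.range (rep.length - 1)).map
        (fun i => PySem.Str.isIn "1" ((binary_add_modulo_2 (rep.getD i "") (rep.getD (i+1) "")).getD ""))
        = ((rep.map pvBitValue).zip ((rep.map pvBitValue).drop 1)).map
          (fun p => decide ¬(p.1 = p.2)) := by
      apply List.ext_getElem
      · simp only [List.length_map, List.length_range, List.length_zip, List.length_drop]
        omega
      · intro i hi1 hi2
        simp only [List.length_map, List.length_range] at hi1
        have h2 : 2 ≤ rep.length := by omega
        simp only [List.getElem_map, List.getElem_range, List.getElem_zip, List.getElem_drop,
          Nat.add_comm 1 i]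
        rw [List.getD_eq_getElem _ _ (by omega), List.getD_eq_getElem _ _ (by omega)]
        rw [pv_pair_flag _ _ (hmem i hi1) (hdig' i (by omega) h2) (hdig' (i+1) (by omega) h2)]
    calc (List.range (rep.length - 1)).any
          (fun i => PySem.Str.isIn "1" ((binary_add_modulo_2 (rep.getD i "") (rep.getD (i+1) "")).getD ""))
        = ((List.range (rep.length - 1)).map
          (fun i => PySem.Str.isIn "1" ((binary_add_modulo_2 (rep.getD i "") (rep.getD (i+1) "")).getD ""))).any id := by
          simp [List.any_map, Function.comp_def]
      _ = (((rep.map pvBitValue).zip ((rep.map pvBitValue).drop 1)).map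
          (fun p => decide ¬(p.1 = p.2))).any id := by rw [hmap2]
      _ = ((rep.map pvBitValue).zip ((rep.map pvBitValue).drop 1)).any
          (fun p => decide ¬(p.1 = p.2)) := by
          simp [List.any_map, Function.comp_def]

-- ===== VERDICT (by name: the statement is the Claim_ definition above) =====
theorem find_detection_events_spec : Claim_equal_find_detection_events := by
  unfold Claim_equal_find_detection_events
  intro sm _ hpre
  unfold Spec_find_detection_events find_detection_events find_detection_events_alt
  apply PySem.List.foldl_congr_mem
  intro acc rep hrep
  obtain ⟨hlen, hdig⟩ := hpre rep hrep
  have hdig' : 2 ≤ rep.length → ∀ s ∈ rep, ∀ c ∈ s.toList, c ∈ pvDig := by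
    intro h2 s hs c hc
    have h := hdig h2 s hs
    rw [List.all_eq_true] at h
    simpa [pvDig] using h c hc
  show (acc.1 ++ [((List.range (rep.length - 1)).foldl
        (fun (s : List String × Bool) i =>
          (s.1 ++ [(binary_add_modulo_2 (rep.getD i "") (rep.getD (i+1) "")).getD ""],
           if PySem.Str.isIn "1" ((binary_add_modulo_2 (rep.getD i "") (rep.getD (i+1) "")).getD "")
           then true else s.2))
        ([], false)).1],
      acc.2 ++ [((List.range (rep.length - 1)).foldl
        (fun (s : List String × Bool) i =>
          (s.1 ++ [(binary_add_modulo_2 (rep.getD i "") (rep.getD (i+1) "")).getD ""],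
           if PySem.Str.isIn "1" ((binary_add_modulo_2 (rep.getD i "") (rep.getD (i+1) "")).getD "")
           then true else s.2))
        ([], false)).2])
    = (acc.1 ++ [(pvRepAlt rep).1], acc.2 ++ [(pvRepAlt rep).2])
  rw [pv_rep_eq rep hlen hdig']
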